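-- pv_equiv track=rewrite | github.com/alexlm78/AoC | 2024/Day14/solve_day14.py | find_most_tree_like_time
-- ===== SOURCE A (Python) =====
-- from typing import List, Tuple
-- from math import gcd
--
-- def step_position(
--     x: int, y: int, dx: int, dy: int, t: int, width: int, height: int
-- ) -> Tuple[int, int]:
--     """
--     Compute position after t seconds with wrap-around on a width x height grid.
--     Args:
--         x, y: Initial position
--         dx, dy: Velocity per second
--         t: Seconds to advance
--         width, height: Grid dimensions
--     Returns:
--         (x', y') wrapped position
--     """
--     nx = (x + dx * t) % width
--     ny = (y + dy * t) % height
--     return nx, ny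
--
-- def lcm(a: int, b: int) -> int:
--     """Least common multiple"""
--     return a // gcd(a, b) * b
--
-- def bounding_box_area(positions: List[Tuple[int, int]]) -> int:
--     """
--     Compute area of the minimal axis-aligned bounding box covering positions.
--     Args:
--         positions: List of (x, y)
--     Returns:
--         Area as (max_x - min_x + 1) * (max_y - min_y + 1)
--     """
--     xs = [p[0] for p in positions]
--     ys = [p[1] for p in positions]
--     return (max(xs) - min(xs) + 1) * (max(ys) - min(ys) + 1)
--
-- def largest_component_size(positions: List[Tuple[int, int]]) -> int:
--     """
--     Compute the size of the largest connected component (4-neighborhood).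
--     """
--     pos_set = set(positions)
--     visited = set()
--     best = 0
--     for p in pos_set:
--         if p in visited:
--             continue
--         stack = [p]
--         visited.add(p)
--         size = 0
--         while stack:
--             x, y = stack.pop()
--             size += 1
--             for nx, ny in ((x - 1, y), (x + 1, y), (x, y - 1), (x, y + 1)):
--                 if (nx, ny) in pos_set and (nx, ny) not in visited:
--                     visited.add((nx, ny))
--                     stack.append((nx, ny))
--         if size > best:
--             best = size
--     return best
--
-- def find_most_tree_like_time(
--     robots: List[Tuple[int, int, int, int]], width: int, height: int
-- ) -> Tuple[int, List[Tuple[int, int]]]: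
--     """
--     Search t in [0, lcm(width,height)) for time with maximal largest connected component.
--     Ties broken by choosing the smallest bounding box area, then smallest t.
--     """
--     period = lcm(width, height)
--     best_t = 0
--     best_comp = -1
--     best_area = None
--     best_positions: List[Tuple[int, int]] = []
--     for t in range(period):
--         positions = [
--             step_position(x, y, dx, dy, t, width, height) for x, y, dx, dy in robots
--         ]
--         comp = largest_component_size(positions)
--         area = bounding_box_area(positions)
--         if (
--             comp > best_comp
--             or (comp == best_comp and (best_area is None or area < best_area))
--             or (comp == best_comp and area == best_area and t < best_t)
--         ):
--             best_comp = comp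
--             best_area = area
--             best_t = t
--             best_positions = positions
--     return best_t, best_positions
-- ===== SOURCE B (Python) =====
-- from math import gcd
--
--
-- def _largest_component(positions):
--     """Max 4-connected component size, by per-source frontier expansion."""
--     cells = set(positions)
--     best = 0
--     for p in cells:
--         comp = {p}
--         frontier = [p]
--         while frontier:
--             new = []
--             for (x, y) in frontier:
--                 for q in ((x - 1, y), (x + 1, y), (x, y - 1), (x, y + 1)):
--                     if q in cells and q not in comp:
--                         comp.add(q)
--                         new.append(q)
--             frontier = new
--         if len(comp) > best:
--             best = len(comp)
--     return best
--
--
-- def find_most_tree_like_time(robots, width, height):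
--     period = width // gcd(width, height) * height
--     best_key = None
--     best_t = 0
--     best_positions = []
--     for t in range(period):
--         positions = [((x + dx * t) % width, (y + dy * t) % height)
--                      for x, y, dx, dy in robots]
--         xs = [p[0] for p in positions]
--         ys = [p[1] for p in positions]
--         area = (max(xs) - min(xs) + 1) * (max(ys) - min(ys) + 1)
--         key = (-_largest_component(positions), area)
--         if best_key is None or key < best_key:
--             best_key = key
--             best_t = t
--             best_positions = positions
--     return best_t, best_positions
-- ===== Notes on version B (the rewrite author's own statement) =====
-- stated objective: alternative
-- what changed: The largest-component routine is restructured from A's single-pass shared-visited stack flood fill into an independent per-source frontier (BFS) closure for each occupied cell with a running maximum of closure sizes, and the best-time tracking is collapsed from four state variables into one optional lexicographic (-component, area) key; Pre_ excludes only the inputs where A raises (gcd(0,0) ZeroDivisionError, and max() of an empty robot list when the search loop runs).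
import Mathlib
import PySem

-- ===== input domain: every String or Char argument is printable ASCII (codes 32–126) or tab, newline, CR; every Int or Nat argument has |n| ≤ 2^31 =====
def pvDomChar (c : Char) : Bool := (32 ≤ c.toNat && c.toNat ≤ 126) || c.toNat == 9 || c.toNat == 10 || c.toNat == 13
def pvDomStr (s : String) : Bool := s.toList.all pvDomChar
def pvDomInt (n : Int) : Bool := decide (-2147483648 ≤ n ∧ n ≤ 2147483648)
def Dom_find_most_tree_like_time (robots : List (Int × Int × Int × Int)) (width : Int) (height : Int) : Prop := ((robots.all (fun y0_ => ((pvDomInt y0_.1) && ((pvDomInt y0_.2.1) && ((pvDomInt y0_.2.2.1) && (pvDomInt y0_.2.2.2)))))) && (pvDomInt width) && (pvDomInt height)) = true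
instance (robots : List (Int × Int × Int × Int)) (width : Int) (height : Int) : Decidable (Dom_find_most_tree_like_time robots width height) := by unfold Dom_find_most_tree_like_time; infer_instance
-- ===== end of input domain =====

-- B replaces A's single-pass shared-visited stack flood fill by an independent per-source frontier
-- (breadth-first) closure for every occupied cell, taking the maximum closure size, and tracks the
-- running optimum with a single optional (-component, area) key instead of four separate variables:
-- an alternative algorithm of similar cost (equal return value proved below).

-- The 4-neighbourhood tuple ((x-1,y),(x+1,y),(x,y-1),(x,y+1)) appearing verbatim in both Pythons.
def pvNbrs (p : Int × Int) : List (Int × Int) :=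
  [(p.1 - 1, p.2), (p.1 + 1, p.2), (p.1, p.2 - 1), (p.1, p.2 + 1)]

-- ===== PORT A =====

def step_position (x y dx dy t width height : Int) : Int × Int :=
  (PySem.Int.mod (x + dx * t) width, PySem.Int.mod (y + dy * t) height)

-- lcm(a, b) = a // gcd(a, b) * b  (math.gcd is the nonnegative Int.gcd)
def pvLcm (a b : Int) : Int := PySem.Int.floordiv a (Int.gcd a b) * b

-- max()/min() raise on an empty list (excluded by Pre_); the `.getD 0` default is never reached there.
def bounding_box_area (positions : List (Int × Int)) : Int :=
  let xs := positions.map (fun p => p.1)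
  let ys := positions.map (fun p => p.2)
  ((PySem.List.max? xs (fun v => v)).getD 0 - (PySem.List.min? xs (fun v => v)).getD 0 + 1) *
    ((PySem.List.max? ys (fun v => v)).getD 0 - (PySem.List.min? ys (fun v => v)).getD 0 + 1)

-- inner `for nx, ny in (...)`: visit and push each unvisited occupied neighbour
def pvDfsStep (S : PySem.Set (Int × Int)) (acc : PySem.Set (Int × Int) × List (Int × Int))
    (q : Int × Int) : PySem.Set (Int × Int) × List (Int × Int) :=
  if q ∈ S ∧ q ∉ acc.1 then (PySem.Set.add acc.1 q, q :: acc.2) else acc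

-- `while stack:` — Python pushes/pops at the list's end, here at the head: same visited set and size.
-- The fuel argument only makes the recursion structural; it is never exhausted (proved below).
def pvDfsLoop (S : PySem.Set (Int × Int)) :
    Nat → List (Int × Int) → PySem.Set (Int × Int) → Int → Int × PySem.Set (Int × Int)
  | 0, _, visited, size => (size, visited)
  | _ + 1, [], visited, size => (size, visited)
  | fuel + 1, p :: rest, visited, size =>
      let st := (pvNbrs p).foldl (pvDfsStep S) (visited, rest)
      pvDfsLoop S fuel st.2 st.1 (size + 1)

-- `for p in pos_set:` iterates in hash order; the running maximum is order-independent
-- (proved below: it equals the maximum closure size over the set), so insertion order is faithful.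
def largest_component_size (positions : List (Int × Int)) : Int :=
  let S := PySem.Set.ofList positions
  (S.foldl (fun acc p =>
      if p ∈ acc.1 then acc
      else
        let r := pvDfsLoop S (2 * positions.length + 1) [p] (PySem.Set.add acc.1 p) 0
        (r.2, if r.1 > acc.2 then r.1 else acc.2))
    ((PySem.Set.empty : PySem.Set (Int × Int)), (0 : Int))).2

def find_most_tree_like_time (robots : List (Int × Int × Int × Int)) (width : Int) (height : Int) :
    Int × (List (Int × Int)) :=
  let period := pvLcm width height
  -- acc = (best_t, best_comp, best_area, best_positions)
  let r := (PySem.List.pyRange 0 period 1).foldl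
    (fun acc t =>
      let positions := robots.map (fun q => step_position q.1 q.2.1 q.2.2.1 q.2.2.2 t width height)
      let comp := largest_component_size positions
      let area := bounding_box_area positions
      let cond : Bool :=
        decide (comp > acc.2.1) ||
        (decide (comp = acc.2.1) &&
          (match acc.2.2.1 with | none => true | some v => decide (area < v))) ||
        (decide (comp = acc.2.1) && decide (acc.2.2.1 = some area) && decide (t < acc.1))
      if cond then (t, comp, some area, positions) else acc)
    ((0 : Int), (-1 : Int), (none : Option Int), ([] : List (Int × Int)))
  (r.1, r.2.2.2)

-- ===== PORT B =====

-- inner `for q in (...)`: add each occupied cell not yet in the component, record it as new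
def pvClosStep (cells : PySem.Set (Int × Int)) (acc : PySem.Set (Int × Int) × List (Int × Int))
    (q : Int × Int) : PySem.Set (Int × Int) × List (Int × Int) :=
  if q ∈ cells ∧ q ∉ acc.1 then (PySem.Set.add acc.1 q, acc.2 ++ [q]) else acc

-- `while frontier:` of Source B; the fuel only makes the recursion structural (never exhausted, proved below).
def pvClosLoop (cells : PySem.Set (Int × Int)) :
    Nat → PySem.Set (Int × Int) → List (Int × Int) → PySem.Set (Int × Int)
  | 0, comp, _ => comp
  | _ + 1, comp, [] => comp
  | fuel + 1, comp, frontier =>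
      let st := frontier.foldl (fun a f => (pvNbrs f).foldl (pvClosStep cells) a) (comp, [])
      pvClosLoop cells fuel st.1 st.2

-- `for p in cells:` — running maximum over a set, order-independent.
def pvLargestComponentAlt (positions : List (Int × Int)) : Int :=
  let cells := PySem.Set.ofList positions
  cells.foldl (fun best p =>
      let comp := pvClosLoop cells (positions.length + 1) (PySem.Set.ofList [p]) [p]
      if PySem.Set.len comp > best then PySem.Set.len comp else best) 0

def find_most_tree_like_time_alt (robots : List (Int × Int × Int × Int)) (width : Int) (height : Int) :
    Int × (List (Int × Int)) :=
  let period := PySem.Int.floordiv width (Int.gcd width height) * height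
  -- acc = (best_key, best_t, best_positions)
  let r := (PySem.List.pyRange 0 period 1).foldl
    (fun acc t =>
      let positions := robots.map (fun q =>
        (PySem.Int.mod (q.1 + q.2.2.1 * t) width, PySem.Int.mod (q.2.1 + q.2.2.2 * t) height))
      let xs := positions.map (fun p => p.1)
      let ys := positions.map (fun p => p.2)
      let area := ((PySem.List.max? xs (fun v => v)).getD 0 - (PySem.List.min? xs (fun v => v)).getD 0 + 1) *
        ((PySem.List.max? ys (fun v => v)).getD 0 - (PySem.List.min? ys (fun v => v)).getD 0 + 1)
      let key : Int × Int := (-(pvLargestComponentAlt positions), area)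
      -- Python tuple comparison `key < best_key` is lexicographic
      let cond : Bool := match acc.1 with
        | none => true
        | some bk => decide (key.1 < bk.1) || (decide (key.1 = bk.1) && decide (key.2 < bk.2))
      if cond then (some key, t, positions) else acc)
    ((none : Option (Int × Int)), (0 : Int), ([] : List (Int × Int)))
  (r.2.1, r.2.2)

-- ===== PRECONDITION & SPEC =====
-- Pre_ excludes exactly the inputs where the Python A raises: width = height = 0 makes
-- `lcm` divide by gcd(0,0) = 0 (ZeroDivisionError), and when the search loop runs at all
-- (lcm(width,height) ≥ 1, i.e. width*height > 0) an empty robot list makes max() raise ValueError.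
def Pre_find_most_tree_like_time (robots : List (Int × Int × Int × Int)) (width : Int) (height : Int) : Prop :=
  ¬(width = 0 ∧ height = 0) ∧ (0 < width * height → robots ≠ [])
instance (robots : List (Int × Int × Int × Int)) (width : Int) (height : Int) : Decidable (Pre_find_most_tree_like_time robots width height) := by unfold Pre_find_most_tree_like_time; infer_instance

def pvWitness_find_most_tree_like_time : (List (Int × Int × Int × Int)) × Int × Int :=
  ([(1, 2, 1, 1), (2, 2, 0, 0)], 4, 3)

def Spec_find_most_tree_like_time (robots : List (Int × Int × Int × Int)) (width : Int) (height : Int) (out : Int × (List (Int × Int))) : Prop := out = find_most_tree_like_time_alt robots width height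
instance (robots : List (Int × Int × Int × Int)) (width : Int) (height : Int) (out : Int × (List (Int × Int))) : Decidable (Spec_find_most_tree_like_time robots width height out) := by unfold Spec_find_most_tree_like_time; infer_instance

-- ===== CLAIM (what is proved, stated in full; the proofs are below) =====
def Claim_equal_find_most_tree_like_time : Prop := ∀ (robots : List (Int × Int × Int × Int)) (width : Int) (height : Int), Dom_find_most_tree_like_time robots width height → Pre_find_most_tree_like_time robots width height → Spec_find_most_tree_like_time robots width height (find_most_tree_like_time robots width height)

-- ===== LEMMAS AND PROOFS =====

-- ---- basic geometry of the 4-neighbourhood ----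

theorem pvNbrs_comm (p q : Int × Int) : q ∈ pvNbrs p ↔ p ∈ pvNbrs q := by
  obtain ⟨a, b⟩ := p; obtain ⟨c, d⟩ := q
  simp [pvNbrs, Prod.ext_iff]
  omega

-- ---- reachability through occupied cells ----

inductive pvReach (S : List (Int × Int)) : (Int × Int) → (Int × Int) → Prop
  | refl (p) : pvReach S p p
  | tail {p q r} : pvReach S p q → r ∈ pvNbrs q → r ∈ S → pvReach S p r

theorem pvReach.trans {S : List (Int × Int)} {p q r : Int × Int}
    (h1 : pvReach S p q) (h2 : pvReach S q r) : pvReach S p r := by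
  induction h2 with
  | refl => exact h1
  | tail _ hn hS ih => exact pvReach.tail ih hn hS

theorem pvReach_mem {S : List (Int × Int)} {p q : Int × Int} (h : pvReach S p q) :
    q = p ∨ q ∈ S := by
  induction h with
  | refl => exact Or.inl rfl
  | tail _ _ hS _ => exact Or.inr hS

theorem pvReach_symm {S : List (Int × Int)} {p q : Int × Int} (hp : p ∈ S)
    (h : pvReach S p q) : pvReach S q p := by
  induction h with
  | refl => exact pvReach.refl _
  | @tail q' r' hpq hn hS ih =>
      refine pvReach.trans ?_ ih
      rcases pvReach_mem hpq with h' | h'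
      · exact pvReach.tail (pvReach.refl _) ((pvNbrs_comm _ _).1 hn) (h' ▸ hp)
      · exact pvReach.tail (pvReach.refl _) ((pvNbrs_comm _ _).1 hn) h'

-- a set of cells having all occupied neighbours of its members
def pvClosed (S V : List (Int × Int)) : Prop :=
  ∀ a ∈ V, ∀ r ∈ pvNbrs a, r ∈ S → r ∈ V

theorem pvClosed_mem {S V : List (Int × Int)} {x y : Int × Int} (hV : pvClosed S V)
    (hx : x ∈ V) (h : pvReach S x y) : y ∈ V := by
  induction h with
  | refl => exact hx
  | tail _ hn hS ih => exact hV _ ih _ hn hS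

theorem pvReach_congr {S₁ S₂ : List (Int × Int)} (h : ∀ r, r ∈ S₁ ↔ r ∈ S₂)
    {p x : Int × Int} (hr : pvReach S₁ p x) : pvReach S₂ p x := by
  induction hr with
  | refl => exact pvReach.refl _
  | tail _ hn hS ih => exact pvReach.tail ih hn ((h _).1 hS)

-- the canonical component of p: B's closure computation
def pvCompList (positions : List (Int × Int)) (p : Int × Int) : List (Int × Int) :=
  pvClosLoop (PySem.Set.ofList positions) (positions.length + 1) (PySem.Set.ofList [p]) [p]

-- ---- characterisation of the fold steps ----

theorem pvClosFold_spec (S : PySem.Set (Int × Int)) :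
    ∀ (L : List (Int × Int)) (c n : List (Int × Int)),
      ∃ d, L.foldl (pvClosStep S) (c, n) = (c ++ d, n ++ d) ∧
        (∀ x ∈ d, x ∈ L ∧ x ∈ S ∧ x ∉ c) ∧
        (∀ x ∈ L, x ∈ S → x ∈ c ++ d) ∧
        (c.Nodup → (c ++ d).Nodup) := by
  intro L
  induction L with
  | nil => exact fun c n => ⟨[], by simp, by simp, by simp, fun h => by simpa using h⟩
  | cons q L ih =>
    intro c n
    simp only [List.foldl_cons]
    by_cases hq : q ∈ S ∧ q ∉ c
    · have hstep : pvClosStep S (c, n) q = (c ++ [q], n ++ [q]) := by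
        simp [pvClosStep, hq]
      rw [hstep]
      obtain ⟨d, hfold, hd, hcomp, hnd⟩ := ih (c ++ [q]) (n ++ [q])
      refine ⟨q :: d, ?_, ?_, ?_, ?_⟩
      · rw [hfold]; simp
      · intro x hx
        rcases List.mem_cons.1 hx with rfl | hx
        · exact ⟨List.mem_cons_self, hq.1, hq.2⟩
        · obtain ⟨h1, h2, h3⟩ := hd x hx
          refine ⟨List.mem_cons_of_mem _ h1, h2, fun hc => h3 ?_⟩
          exact List.mem_append_left _ hc
      · intro x hx hxS
        rcases List.mem_cons.1 hx with rfl | hx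
        · simp
        · have := hcomp x hx hxS
          simpa [List.append_assoc] using this
      · intro hc
        have : (c ++ [q]).Nodup := by
          rw [List.nodup_append]
          exact ⟨hc, List.nodup_singleton q, by intro a ha b hb; rw [List.mem_singleton] at hb; subst hb; exact fun h => hq.2 (h ▸ ha)⟩
        have := hnd this
        simpa [List.append_assoc] using this
    · have hstep : pvClosStep S (c, n) q = (c, n) := by
        simp only [pvClosStep, if_neg hq]
      rw [hstep]
      obtain ⟨d, hfold, hd, hcomp, hnd⟩ := ih c n
      refine ⟨d, hfold, ?_, ?_, hnd⟩
      · intro x hx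
        obtain ⟨h1, h2, h3⟩ := hd x hx
        exact ⟨List.mem_cons_of_mem _ h1, h2, h3⟩
      · intro x hx hxS
        rcases List.mem_cons.1 hx with rfl | hx
        · rcases Decidable.not_and_iff_or_not.1 hq with h | h
          · exact absurd hxS h
          · exact List.mem_append_left _ (Decidable.not_not.1 h)
        · exact hcomp x hx hxS

theorem pvClosFold2_spec (S : PySem.Set (Int × Int)) :
    ∀ (F : List (Int × Int)) (c n : List (Int × Int)),
      ∃ d, F.foldl (fun a f => (pvNbrs f).foldl (pvClosStep S) a) (c, n) = (c ++ d, n ++ d) ∧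
        (∀ x ∈ d, x ∈ S ∧ x ∉ c ∧ ∃ f ∈ F, x ∈ pvNbrs f) ∧
        (∀ f ∈ F, ∀ x ∈ pvNbrs f, x ∈ S → x ∈ c ++ d) ∧
        (c.Nodup → (c ++ d).Nodup) := by
  intro F
  induction F with
  | nil => exact fun c n => ⟨[], by simp, by simp, by simp, fun h => by simpa using h⟩
  | cons f F ih =>
    intro c n
    simp only [List.foldl_cons]
    obtain ⟨d1, hfold1, hd1, hcomp1, hnd1⟩ := pvClosFold_spec S (pvNbrs f) c n
    rw [hfold1]
    obtain ⟨d2, hfold2, hd2, hcomp2, hnd2⟩ := ih (c ++ d1) (n ++ d1)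
    refine ⟨d1 ++ d2, ?_, ?_, ?_, ?_⟩
    · rw [hfold2]; simp
    · intro x hx
      rcases List.mem_append.1 hx with hx | hx
      · obtain ⟨h1, h2, h3⟩ := hd1 x hx
        exact ⟨h2, h3, f, List.mem_cons_self, h1⟩
      · obtain ⟨h2, h3, g, hg, hgn⟩ := hd2 x hx
        exact ⟨h2, fun hc => h3 (List.mem_append_left _ hc), g, List.mem_cons_of_mem _ hg, hgn⟩
    · intro g hg x hx hxS
      rcases List.mem_cons.1 hg with rfl | hg
      · have := hcomp1 x hx hxS
        rcases List.mem_append.1 this with h | h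
        · exact List.mem_append_left _ h
        · exact List.mem_append_right _ (List.mem_append_left _ h)
      · have := hcomp2 g hg x hx hxS
        simpa [List.append_assoc] using this
    · intro hc
      have := hnd2 (hnd1 hc)
      simpa [List.append_assoc] using this

theorem pvDfsFold_spec (S : PySem.Set (Int × Int)) :
    ∀ (L : List (Int × Int)) (v rest : List (Int × Int)),
      ∃ d, L.foldl (pvDfsStep S) (v, rest) = (v ++ d, d.reverse ++ rest) ∧
        (∀ x ∈ d, x ∈ L ∧ x ∈ S ∧ x ∉ v) ∧
        (∀ x ∈ L, x ∈ S → x ∈ v ++ d) ∧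
        (v.Nodup → (v ++ d).Nodup) := by
  intro L
  induction L with
  | nil => exact fun v rest => ⟨[], by simp, by simp, by simp, fun h => by simpa using h⟩
  | cons q L ih =>
    intro v rest
    simp only [List.foldl_cons]
    by_cases hq : q ∈ S ∧ q ∉ v
    · have hstep : pvDfsStep S (v, rest) q = (v ++ [q], q :: rest) := by
        simp [pvDfsStep, hq]
      rw [hstep]
      obtain ⟨d, hfold, hd, hcomp, hnd⟩ := ih (v ++ [q]) (q :: rest)
      refine ⟨q :: d, ?_, ?_, ?_, ?_⟩
      · rw [hfold]; simp
      · intro x hx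
        rcases List.mem_cons.1 hx with rfl | hx
        · exact ⟨List.mem_cons_self, hq.1, hq.2⟩
        · obtain ⟨h1, h2, h3⟩ := hd x hx
          refine ⟨List.mem_cons_of_mem _ h1, h2, fun hc => h3 ?_⟩
          exact List.mem_append_left _ hc
      · intro x hx hxS
        rcases List.mem_cons.1 hx with rfl | hx
        · simp
        · have := hcomp x hx hxS
          simpa [List.append_assoc] using this
      · intro hc
        have : (v ++ [q]).Nodup := by
          rw [List.nodup_append]
          exact ⟨hc, List.nodup_singleton q, by intro a ha b hb; rw [List.mem_singleton] at hb; subst hb; exact fun h => hq.2 (h ▸ ha)⟩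
        have := hnd this
        simpa [List.append_assoc] using this
    · have hstep : pvDfsStep S (v, rest) q = (v, rest) := by
        simp only [pvDfsStep, if_neg hq]
      rw [hstep]
      obtain ⟨d, hfold, hd, hcomp, hnd⟩ := ih v rest
      refine ⟨d, hfold, ?_, ?_, hnd⟩
      · intro x hx
        obtain ⟨h1, h2, h3⟩ := hd x hx
        exact ⟨List.mem_cons_of_mem _ h1, h2, h3⟩
      · intro x hx hxS
        rcases List.mem_cons.1 hx with rfl | hx
        · rcases Decidable.not_and_iff_or_not.1 hq with h | h
          · exact absurd hxS h
          · exact List.mem_append_left _ (Decidable.not_not.1 h)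
        · exact hcomp x hx hxS

-- ---- B's closure loop computes exactly the reachable set ----

theorem pvClosLoop_spec (S : List (Int × Int)) (hS : S.Nodup) (p : Int × Int) (hp : p ∈ S) :
    ∀ (fuel : Nat) (comp frontier : List (Int × Int)),
      comp.Nodup → p ∈ comp → (∀ x ∈ comp, x ∈ S) → (∀ x ∈ frontier, x ∈ comp) →
      (∀ x ∈ comp, pvReach S p x) →
      (∀ x ∈ comp, x ∉ frontier → ∀ r ∈ pvNbrs x, r ∈ S → r ∈ comp) →
      S.length + 1 ≤ fuel + comp.length →
      (pvClosLoop S fuel comp frontier).Nodup ∧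
        (∀ x, x ∈ pvClosLoop S fuel comp frontier ↔ pvReach S p x) := by
  intro fuel
  induction fuel with
  | zero =>
    intro comp frontier hnd hpc hcS _ _ _ hfuel
    exfalso
    have hlen : comp.length ≤ S.length := (List.Nodup.subperm hnd hcS).length_le
    omega
  | succ fuel ih =>
    intro comp frontier hnd hpc hcS hfc hreach hproc hfuel
    match frontier with
    | [] =>
      refine ⟨hnd, fun x => ⟨hreach x, fun hr => ?_⟩⟩
      exact pvClosed_mem (fun a ha r hrn hrS => hproc a ha (by simp) r hrn hrS) hpc hr
    | f :: fs =>
      obtain ⟨d, hfold, hd, hcomp, hndf⟩ := pvClosFold2_spec S (f :: fs) comp []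
      have hstep : pvClosLoop S (fuel + 1) comp (f :: fs) = pvClosLoop S fuel (comp ++ d) d := by
        show pvClosLoop S fuel
            ((f :: fs).foldl (fun a g => (pvNbrs g).foldl (pvClosStep S) a) (comp, [])).1
            ((f :: fs).foldl (fun a g => (pvNbrs g).foldl (pvClosStep S) a) (comp, [])).2 = _
        rw [hfold]
        simp
      rw [hstep]
      by_cases hdnil : d = []
      · subst hdnil
        have hres : pvClosLoop S fuel (comp ++ []) [] = comp := by
          cases fuel <;> simp [pvClosLoop]
        rw [hres]
        refine ⟨hnd, fun x => ⟨hreach x, fun hr => ?_⟩⟩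
        refine pvClosed_mem (fun a ha r hrn hrS => ?_) hpc hr
        by_cases haf : a ∈ f :: fs
        · simpa using hcomp a haf r hrn hrS
        · exact hproc a ha haf r hrn hrS
      · refine ih (comp ++ d) d (hndf hnd) (List.mem_append_left _ hpc) ?_ ?_ ?_ ?_ ?_
        · intro x hx
          rcases List.mem_append.1 hx with hx | hx
          · exact hcS x hx
          · exact (hd x hx).1
        · exact fun x hx => List.mem_append_right _ hx
        · intro x hx
          rcases List.mem_append.1 hx with hx | hx
          · exact hreach x hx
          · obtain ⟨hxS, hxnc, g, hgF, hgn⟩ := hd x hx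
            exact pvReach.tail (hreach g (hfc g hgF)) hgn hxS
        · intro x hx hxd r hrn hrS
          have hxc : x ∈ comp := by
            rcases List.mem_append.1 hx with h | h
            · exact h
            · exact absurd h hxd
          by_cases hxf : x ∈ f :: fs
          · exact hcomp x hxf r hrn hrS
          · exact List.mem_append_left _ (hproc x hxc hxf r hrn hrS)
        · have hdpos : 0 < d.length := List.length_pos_iff.2 hdnil
          rw [List.length_append]
          omega

theorem pvCompList_spec (positions : List (Int × Int)) (p : Int × Int)
    (hp : p ∈ PySem.Set.ofList positions) :
    (pvCompList positions p).Nodup ∧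
      (∀ x, x ∈ pvCompList positions p ↔ pvReach (PySem.Set.ofList positions) p x) := by
  have hnd : (PySem.Set.ofList positions).Nodup := PySem.Set.nodup_ofList positions
  have h1 : PySem.Set.ofList [p] = [p] := rfl
  have := pvClosLoop_spec (PySem.Set.ofList positions) hnd p hp (positions.length + 1) [p] [p]
    (List.nodup_singleton p) (List.mem_singleton.2 rfl)
    (fun x hx => by rw [List.mem_singleton.1 hx]; exact hp)
    (fun x hx => hx)
    (fun x hx => by rw [List.mem_singleton.1 hx]; exact pvReach.refl p)
    (fun x hx hnx => absurd hx hnx)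
    (by have := PySem.Set.length_ofList_le positions; simp; omega)
  unfold pvCompList
  rw [h1]
  exact this

-- ---- A's DFS loop returns the same component size ----

theorem pvDfsLoop_spec (S : List (Int × Int)) (hS : S.Nodup) (p : Int × Int) (hp : p ∈ S)
    (V : List (Int × Int)) (hV : ∀ x ∈ V, ¬ pvReach S p x) :
    ∀ (fuel : Nat) (stack W : List (Int × Int)) (size : Int),
      (∀ x ∈ W, pvReach S p x) → p ∈ W → (V ++ W).Nodup →
      (∀ x ∈ stack, x ∈ W) → stack.Nodup →
      size = (W.length : Int) - stack.length →
      (∀ x ∈ W, x ∉ stack → ∀ r ∈ pvNbrs x, r ∈ S → r ∈ W) →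
      stack.length + 2 * (pvCompList S p).length ≤ fuel + 2 * W.length →
      ∃ W', pvDfsLoop S fuel stack (V ++ W) size = ((W'.length : Int), V ++ W') ∧
        W'.Nodup ∧ (∀ x, x ∈ W' ↔ pvReach S p x) := by
  have hC : (pvCompList S p).Nodup ∧ (∀ x, x ∈ pvCompList S p ↔ pvReach S p x) := by
    have h0 := pvCompList_spec S p ((PySem.Set.mem_ofList S p).2 hp)
    exact ⟨h0.1, fun x =>
      ⟨fun hx => pvReach_congr (fun r => PySem.Set.mem_ofList S r) ((h0.2 x).1 hx),
       fun hr => (h0.2 x).2 (pvReach_congr (fun r => (PySem.Set.mem_ofList S r).symm) hr)⟩⟩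
  intro fuel
  induction fuel with
  | zero =>
    intro stack W size hW hpW hnodup hstack hstacknd hsize hproc hfuel
    match stack with
    | [] =>
      refine ⟨W, ?_, (List.nodup_append.1 hnodup).2.1, fun x => ⟨fun hx => hW x hx, fun hr => ?_⟩⟩
      · have : size = (W.length : Int) := by simpa using hsize
        rw [show pvDfsLoop S 0 [] (V ++ W) size = (size, V ++ W) from rfl, this]
      · exact pvClosed_mem (fun a ha r hrn hrS => hproc a ha (by simp) r hrn hrS) hpW hr
    | q :: rest =>
      exfalso
      have hWsub : ∀ x ∈ W, x ∈ pvCompList S p := fun x hx => (hC.2 x).2 (hW x hx)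
      have hWnd : W.Nodup := (List.nodup_append.1 hnodup).2.1
      have hlen : W.length ≤ (pvCompList S p).length := (List.Nodup.subperm hWnd hWsub).length_le
      simp only [List.length_cons] at hfuel
      omega
  | succ fuel ih =>
    intro stack W size hW hpW hnodup hstack hstacknd hsize hproc hfuel
    match stack with
    | [] =>
      refine ⟨W, ?_, (List.nodup_append.1 hnodup).2.1, fun x => ⟨fun hx => hW x hx, fun hr => ?_⟩⟩
      · have : size = (W.length : Int) := by simpa using hsize
        rw [show pvDfsLoop S (fuel + 1) [] (V ++ W) size = (size, V ++ W) from rfl, this]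
      · exact pvClosed_mem (fun a ha r hrn hrS => hproc a ha (by simp) r hrn hrS) hpW hr
    | q :: rest =>
      obtain ⟨d, hfold, hd, hcomp, hndf⟩ := pvDfsFold_spec S (pvNbrs q) (V ++ W) rest
      have hstep : pvDfsLoop S (fuel + 1) (q :: rest) (V ++ W) size
          = pvDfsLoop S fuel (d.reverse ++ rest) (V ++ (W ++ d)) (size + 1) := by
        show pvDfsLoop S fuel
            ((pvNbrs q).foldl (pvDfsStep S) (V ++ W, rest)).2
            ((pvNbrs q).foldl (pvDfsStep S) (V ++ W, rest)).1 (size + 1) = _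
        rw [hfold, List.append_assoc]
      rw [hstep]
      have hqW : q ∈ W := hstack q List.mem_cons_self
      have hreachq : pvReach S p q := hW q hqW
      have hrest : ∀ x ∈ rest, x ∈ W := fun x hx => hstack x (List.mem_cons_of_mem _ hx)
      have hdnew : ∀ x ∈ d, x ∉ V ++ W := fun x hx => (hd x hx).2.2
      have hdS : ∀ x ∈ d, x ∈ S := fun x hx => (hd x hx).2.1
      have hdreach : ∀ x ∈ d, pvReach S p x :=
        fun x hx => pvReach.tail hreachq (hd x hx).1 (hdS x hx)
      have hnodup' : (V ++ (W ++ d)).Nodup := by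
        have := hndf hnodup
        rwa [List.append_assoc] at this
      have hdnd : d.Nodup := (List.nodup_append.1 (hndf hnodup)).2.1
      refine ih (d.reverse ++ rest) (W ++ d) (size + 1) ?_ (List.mem_append_left _ hpW)
        hnodup' ?_ ?_ ?_ ?_ ?_
      · intro x hx
        rcases List.mem_append.1 hx with hx | hx
        · exact hW x hx
        · exact hdreach x hx
      · intro x hx
        rcases List.mem_append.1 hx with hx | hx
        · exact List.mem_append_right _ (List.mem_reverse.1 hx)
        · exact List.mem_append_left _ (hrest x hx)
      · rw [List.nodup_append]
        refine ⟨List.nodup_reverse.2 hdnd, (List.nodup_cons.1 hstacknd).2, ?_⟩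
        intro a ha b hb
        have had : a ∈ d := List.mem_reverse.1 ha
        intro h
        exact hdnew a had (List.mem_append_right _ (h ▸ hrest b hb))
      · simp only [List.length_append, List.length_reverse, List.length_cons] at hsize ⊢
        push_cast at hsize ⊢
        omega
      · intro x hx hxs r hrn hrS
        rcases List.mem_append.1 hx with hxW | hxd
        · by_cases hxq : x = q
          · subst hxq
            have := hcomp r hrn hrS
            rcases List.mem_append.1 this with h | h
            · rcases List.mem_append.1 h with h | h
              · exact absurd (pvReach.tail (hW x hxW) hrn hrS) (hV r h)
              · exact List.mem_append_left _ h
            · exact List.mem_append_right _ h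
          · have hxnr : x ∉ q :: rest := by
              intro h
              rcases List.mem_cons.1 h with h | h
              · exact hxq h
              · exact hxs (List.mem_append_right _ h)
            exact List.mem_append_left _ (hproc x hxW hxnr r hrn hrS)
        · exact absurd (List.mem_append_left _ (List.mem_reverse.2 hxd)) hxs
      · simp only [List.length_append, List.length_reverse, List.length_cons] at hfuel ⊢
        omega

-- ---- the two largest-component computations agree ----

-- the size of p's component, as B computes it
def pvCompCard (positions : List (Int × Int)) (p : Int × Int) : Int :=
  ((pvCompList positions p).length : Int)

theorem pvAlt_as_fold (positions : List (Int × Int)) :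
    pvLargestComponentAlt positions
      = (PySem.Set.ofList positions).foldl
          (fun b p => if pvCompCard positions p > b then pvCompCard positions p else b) 0 := rfl

theorem pvCompCard_mono (positions : List (Int × Int)) {p x : Int × Int}
    (hp : p ∈ PySem.Set.ofList positions) (hx : x ∈ PySem.Set.ofList positions)
    (h : pvReach (PySem.Set.ofList positions) p x) :
    pvCompCard positions x ≤ pvCompCard positions p := by
  obtain ⟨hndx, hmemx⟩ := pvCompList_spec positions x hx
  obtain ⟨hndp, hmemp⟩ := pvCompList_spec positions p hp
  have hsub : ∀ y ∈ pvCompList positions x, y ∈ pvCompList positions p :=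
    fun y hy => (hmemp y).2 (pvReach.trans h ((hmemx y).1 hy))
  unfold pvCompCard
  exact_mod_cast (List.Nodup.subperm hndx hsub).length_le

theorem pvLcsA_fold (positions : List (Int × Int)) :
    ∀ (l : List (Int × Int)), (∀ x ∈ l, x ∈ PySem.Set.ofList positions) →
    ∀ (v : List (Int × Int)) (best : Int),
      v.Nodup → (∀ x ∈ v, x ∈ PySem.Set.ofList positions) →
      pvClosed (PySem.Set.ofList positions) v →
      (∀ x ∈ v, pvCompCard positions x ≤ best) →
      (l.foldl (fun acc p =>
          if p ∈ acc.1 then acc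
          else
            let r := pvDfsLoop (PySem.Set.ofList positions) (2 * positions.length + 1) [p]
              (PySem.Set.add acc.1 p) 0
            (r.2, if r.1 > acc.2 then r.1 else acc.2)) (v, best)).2
        = l.foldl (fun b p => if pvCompCard positions p > b then pvCompCard positions p else b) best := by
  intro l
  induction l with
  | nil => intro _ v best _ _ _ _; rfl
  | cons p l ih =>
    intro hl v best hvnd hvS hvcl hvb
    have hpS : p ∈ PySem.Set.ofList positions := hl p List.mem_cons_self
    have hlS : ∀ x ∈ l, x ∈ PySem.Set.ofList positions := fun x hx => hl x (List.mem_cons_of_mem _ hx)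
    simp only [List.foldl_cons]
    by_cases hpv : p ∈ v
    · have hA : (if p ∈ (v, best).1 then (v, best)
          else
            let r := pvDfsLoop (PySem.Set.ofList positions) (2 * positions.length + 1) [p]
              (PySem.Set.add (v, best).1 p) 0
            (r.2, if r.1 > (v, best).2 then r.1 else (v, best).2)) = (v, best) := by
        simp [hpv]
      have hB : (if pvCompCard positions p > best then pvCompCard positions p else best) = best := by
        rw [if_neg]
        exact not_lt.2 (hvb p hpv)
      rw [hA, hB]
      exact ih hlS v best hvnd hvS hvcl hvb
    · have hV : ∀ x ∈ v, ¬ pvReach (PySem.Set.ofList positions) p x := by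
        intro x hxv hr
        exact hpv (pvClosed_mem hvcl hxv (pvReach_symm hpS hr))
      have hnodup : (v ++ [p]).Nodup := by
        rw [List.nodup_append]
        refine ⟨hvnd, List.nodup_singleton p, ?_⟩
        intro a ha b hb h
        rw [List.mem_singleton] at hb
        subst hb
        exact hpv (h ▸ ha)
      have hfuel : [p].length + 2 * (pvCompList (PySem.Set.ofList positions) p).length
          ≤ (2 * positions.length + 1) + 2 * ([p] : List (Int × Int)).length := by
        have h1 : (pvCompList (PySem.Set.ofList positions) p).length ≤ positions.length + 1 := by
          have hmem : p ∈ PySem.Set.ofList (PySem.Set.ofList positions) :=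
            (PySem.Set.mem_ofList _ p).2 hpS
          obtain ⟨hnd, hm⟩ := pvCompList_spec (PySem.Set.ofList positions) p hmem
          have hsub : ∀ y ∈ pvCompList (PySem.Set.ofList positions) p,
              y ∈ p :: PySem.Set.ofList positions := by
            intro y hy
            rcases pvReach_mem (pvReach_congr
              (fun r => PySem.Set.mem_ofList (PySem.Set.ofList positions) r) ((hm y).1 hy)) with h | h
            · exact h ▸ List.mem_cons_self
            · exact List.mem_cons_of_mem _ h
          have := (List.Nodup.subperm hnd hsub).length_le
          have h2 := PySem.Set.length_ofList_le positions
          simp at this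
          omega
        simp only [List.length_cons, List.length_nil]
        omega
      obtain ⟨W', hres, hWnd, hWmem⟩ := pvDfsLoop_spec (PySem.Set.ofList positions)
        (PySem.Set.nodup_ofList positions) p hpS v hV (2 * positions.length + 1) [p] [p] 0
        (fun x hx => by rw [List.mem_singleton.1 hx]; exact pvReach.refl p)
        (List.mem_singleton.2 rfl) hnodup (fun x hx => hx) (List.nodup_singleton p)
        (by simp) (fun x hx hnx => absurd hx hnx) hfuel
      have hadd : PySem.Set.add v p = v ++ [p] := PySem.Set.add_of_not_mem hpv
      have hcard : (W'.length : Int) = pvCompCard positions p := by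
        obtain ⟨hndp, hmemp⟩ := pvCompList_spec positions p hpS
        have hperm : W'.Perm (pvCompList positions p) :=
          (List.perm_ext_iff_of_nodup hWnd hndp).2
            (fun x => (hWmem x).trans (hmemp x).symm)
        exact_mod_cast congrArg Nat.cast hperm.length_eq
      have hA : (if p ∈ (v, best).1 then (v, best)
          else
            let r := pvDfsLoop (PySem.Set.ofList positions) (2 * positions.length + 1) [p]
              (PySem.Set.add (v, best).1 p) 0
            (r.2, if r.1 > (v, best).2 then r.1 else (v, best).2))
          = (v ++ W', if pvCompCard positions p > best then pvCompCard positions p else best) := by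
        rw [if_neg hpv]
        show (_, _) = _
        rw [hadd, hres, hcard]
      rw [hA]
      have hWS : ∀ x ∈ W', x ∈ PySem.Set.ofList positions := by
        intro x hx
        rcases pvReach_mem ((hWmem x).1 hx) with h | h
        · exact h ▸ hpS
        · exact h
      have hbest' : ∀ x ∈ v ++ W',
          pvCompCard positions x
            ≤ (if pvCompCard positions p > best then pvCompCard positions p else best) := by
        intro x hx
        rcases List.mem_append.1 hx with hx | hx
        · refine le_trans (hvb x hx) ?_
          split <;> omega
        · refine le_trans (pvCompCard_mono positions hpS (hWS x hx) ((hWmem x).1 hx)) ?_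
          split <;> omega
      refine ih hlS (v ++ W') _ ?_ ?_ ?_ hbest'
      · rw [List.nodup_append]
        refine ⟨hvnd, hWnd, ?_⟩
        intro a ha b hb h
        subst h
        exact hV a ha ((hWmem a).1 hb)
      · intro x hx
        rcases List.mem_append.1 hx with hx | hx
        · exact hvS x hx
        · exact hWS x hx
      · intro a ha r hrn hrS
        rcases List.mem_append.1 ha with ha | ha
        · exact List.mem_append_left _ (hvcl a ha r hrn hrS)
        · exact List.mem_append_right _
            ((hWmem r).2 (pvReach.tail ((hWmem a).1 ha) hrn hrS))

theorem pvLcs_eq (positions : List (Int × Int)) :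
    largest_component_size positions = pvLargestComponentAlt positions := by
  rw [pvAlt_as_fold]
  unfold largest_component_size
  exact pvLcsA_fold positions (PySem.Set.ofList positions) (fun x hx => hx)
    PySem.Set.empty 0 List.nodup_nil (by simp [PySem.Set.empty])
    (by intro a ha; simp [PySem.Set.empty] at ha) (by intro x hx; simp [PySem.Set.empty] at hx)

theorem pvLcsAlt_nonneg (positions : List (Int × Int)) : 0 ≤ pvLargestComponentAlt positions := by
  rw [pvAlt_as_fold]
  have : ∀ (l : List (Int × Int)) (b : Int), 0 ≤ b →
      0 ≤ l.foldl (fun b p => if pvCompCard positions p > b then pvCompCard positions p else b) b := by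
    intro l
    induction l with
    | nil => intro b hb; exact hb
    | cons p l ih =>
      intro b hb
      simp only [List.foldl_cons]
      refine ih _ ?_
      split <;> omega
  exact this _ 0 le_rfl

-- ---- the outer search loops agree ----

-- A's and B's per-time-step fold functions, and the relation between their accumulators

def pvStepA (robots : List (Int × Int × Int × Int)) (width height : Int)
    (acc : Int × Int × Option Int × List (Int × Int)) (t : Int) :
    Int × Int × Option Int × List (Int × Int) :=
  let positions := robots.map (fun q => step_position q.1 q.2.1 q.2.2.1 q.2.2.2 t width height)
  let comp := largest_component_size positions
  let area := bounding_box_area positions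
  let cond : Bool :=
    decide (comp > acc.2.1) ||
    (decide (comp = acc.2.1) &&
      (match acc.2.2.1 with | none => true | some v => decide (area < v))) ||
    (decide (comp = acc.2.1) && decide (acc.2.2.1 = some area) && decide (t < acc.1))
  if cond then (t, comp, some area, positions) else acc

def pvStepB (robots : List (Int × Int × Int × Int)) (width height : Int)
    (acc : Option (Int × Int) × Int × List (Int × Int)) (t : Int) :
    Option (Int × Int) × Int × List (Int × Int) :=
  let positions := robots.map (fun q =>
    (PySem.Int.mod (q.1 + q.2.2.1 * t) width, PySem.Int.mod (q.2.1 + q.2.2.2 * t) height))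
  let xs := positions.map (fun p => p.1)
  let ys := positions.map (fun p => p.2)
  let area := ((PySem.List.max? xs (fun v => v)).getD 0 - (PySem.List.min? xs (fun v => v)).getD 0 + 1) *
    ((PySem.List.max? ys (fun v => v)).getD 0 - (PySem.List.min? ys (fun v => v)).getD 0 + 1)
  let key : Int × Int := (-(pvLargestComponentAlt positions), area)
  let cond : Bool := match acc.1 with
    | none => true
    | some bk => decide (key.1 < bk.1) || (decide (key.1 = bk.1) && decide (key.2 < bk.2))
  if cond then (some key, t, positions) else acc

def pvRel (a : Int × Int × Option Int × List (Int × Int))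
    (b : Option (Int × Int) × Int × List (Int × Int)) : Prop :=
  a.1 = b.2.1 ∧ a.2.2.2 = b.2.2 ∧
    ((a.2.1 = -1 ∧ a.2.2.1 = none ∧ b.1 = none) ∨
     (0 ≤ a.2.1 ∧ ∃ ar, a.2.2.1 = some ar ∧ b.1 = some (-a.2.1, ar)))

theorem pvStep_rel (robots : List (Int × Int × Int × Int)) (width height : Int)
    (a : Int × Int × Option Int × List (Int × Int))
    (b : Option (Int × Int) × Int × List (Int × Int)) (t : Int)
    (hrel : pvRel a b) (hle : a.1 ≤ t) :
    pvRel (pvStepA robots width height a t) (pvStepB robots width height b t) ∧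
      ((pvStepA robots width height a t).1 = t ∨ pvStepA robots width height a t = a) := by
  obtain ⟨h1, h2, hcase⟩ := hrel
  set P := robots.map (fun q =>
    (PySem.Int.mod (q.1 + q.2.2.1 * t) width, PySem.Int.mod (q.2.1 + q.2.2.2 * t) height)) with hP
  set c := pvLargestComponentAlt P with hc
  set ar := bounding_box_area P with har
  have hc0 : 0 ≤ c := pvLcsAlt_nonneg P
  have hA : pvStepA robots width height a t
      = (if (decide (largest_component_size P > a.2.1) ||
            (decide (largest_component_size P = a.2.1) &&
              (match a.2.2.1 with | none => true | some v => decide (ar < v))) ||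
            (decide (largest_component_size P = a.2.1) && decide (a.2.2.1 = some ar) && decide (t < a.1)))
          then (t, largest_component_size P, some ar, P) else a) := rfl
  rw [pvLcs_eq P, ← hc] at hA
  have hB : pvStepB robots width height b t
      = (if (match b.1 with
            | none => true
            | some bk => decide (-c < bk.1) || (decide (-c = bk.1) && decide (ar < bk.2)))
          then (some (-c, ar), t, P) else b) := rfl
  rcases hcase with ⟨hbc, hba, hbk⟩ | ⟨h0bc, ar0, hba, hbk⟩
  · have hcondA : (decide (c > a.2.1) ||
        (decide (c = a.2.1) &&
          (match a.2.2.1 with | none => true | some v => decide (ar < v))) ||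
        (decide (c = a.2.1) && decide (a.2.2.1 = some ar) && decide (t < a.1))) = true := by
      have : decide (c > a.2.1) = true := decide_eq_true (by rw [hbc]; omega)
      simp [this]
    have hcondB : (match b.1 with
        | none => true
        | some bk => decide (-c < bk.1) || (decide (-c = bk.1) && decide (ar < bk.2))) = true := by
      rw [hbk]
    rw [hA, hB, hcondA, hcondB, if_pos rfl, if_pos rfl]
    exact ⟨⟨rfl, rfl, Or.inr ⟨hc0, ar, rfl, rfl⟩⟩, Or.inl rfl⟩
  · have hnt : decide (t < a.1) = false := decide_eq_false (by omega)
    have hcondB : (match b.1 with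
        | none => true
        | some bk => decide (-c < bk.1) || (decide (-c = bk.1) && decide (ar < bk.2)))
        = (decide (-c < -a.2.1) || (decide (-c = -a.2.1) && decide (ar < ar0))) := by
      rw [hbk]
    have hconds : (decide (c > a.2.1) ||
        (decide (c = a.2.1) &&
          (match a.2.2.1 with | none => true | some v => decide (ar < v))) ||
        (decide (c = a.2.1) && decide (a.2.2.1 = some ar) && decide (t < a.1)))
        = (decide (-c < -a.2.1) || (decide (-c = -a.2.1) && decide (ar < ar0))) := by
      rw [hba, hnt]
      by_cases hgt : c > a.2.1
      · have e1 : decide (c > a.2.1) = true := decide_eq_true hgt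
        have e2 : decide (-c < -a.2.1) = true := decide_eq_true (by omega)
        simp [e1]
      · have e1 : decide (c > a.2.1) = false := decide_eq_false hgt
        have e2 : decide (-c < -a.2.1) = false := decide_eq_false (by omega)
        by_cases heq : c = a.2.1
        · have e3 : decide (c = a.2.1) = true := decide_eq_true heq
          have e4 : decide (-c = -a.2.1) = true := decide_eq_true (by omega)
          simp [e1, e3]
        · have e3 : decide (c = a.2.1) = false := decide_eq_false heq
          have e4 : decide (-c = -a.2.1) = false := decide_eq_false (by omega)
          simp [e1, e3]
    rw [hA, hB, hconds, hcondB]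
    by_cases hcond : (decide (-c < -a.2.1) || (decide (-c = -a.2.1) && decide (ar < ar0))) = true
    · rw [if_pos hcond, if_pos hcond]
      exact ⟨⟨rfl, rfl, Or.inr ⟨hc0, ar, rfl, rfl⟩⟩, Or.inl rfl⟩
    · rw [if_neg hcond, if_neg hcond]
      exact ⟨⟨h1, h2, Or.inr ⟨h0bc, ar0, hba, hbk⟩⟩, Or.inr rfl⟩

theorem pvFold_rel (robots : List (Int × Int × Int × Int)) (width height : Int) :
    ∀ (ts : List Int), ts.Pairwise (· < ·) →
    ∀ a b, pvRel a b → (∀ u ∈ ts, a.1 ≤ u) →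
      pvRel (ts.foldl (pvStepA robots width height) a) (ts.foldl (pvStepB robots width height) b) := by
  intro ts
  induction ts with
  | nil => intro _ a b hrel _; exact hrel
  | cons t ts ih =>
    intro hpw a b hrel hle
    obtain ⟨hpwh, hpwt⟩ := List.pairwise_cons.1 hpw
    obtain ⟨hrel', hupd⟩ := pvStep_rel robots width height a b t hrel (hle t List.mem_cons_self)
    simp only [List.foldl_cons]
    refine ih hpwt _ _ hrel' ?_
    intro u hu
    rcases hupd with h | h
    · rw [h]; exact le_of_lt (hpwh u hu)
    · rw [h]; exact hle u (List.mem_cons_of_mem _ hu)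

theorem pvOuter_eq (robots : List (Int × Int × Int × Int)) (width height : Int) :
    find_most_tree_like_time robots width height = find_most_tree_like_time_alt robots width height := by
  obtain ⟨h1, h2, _⟩ := pvFold_rel robots width height
    (PySem.List.pyRange 0 (pvLcm width height) 1)
    (PySem.List.pairwise_lt_pyRange_one 0 (pvLcm width height))
    ((0 : Int), (-1 : Int), (none : Option Int), ([] : List (Int × Int)))
    ((none : Option (Int × Int)), (0 : Int), ([] : List (Int × Int)))
    ⟨rfl, rfl, Or.inl ⟨rfl, rfl, rfl⟩⟩
    (fun u hu => (PySem.List.mem_pyRange_one.1 hu).1)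
  have eA : find_most_tree_like_time robots width height
      = (((PySem.List.pyRange 0 (pvLcm width height) 1).foldl (pvStepA robots width height)
            ((0 : Int), (-1 : Int), (none : Option Int), ([] : List (Int × Int)))).1,
         ((PySem.List.pyRange 0 (pvLcm width height) 1).foldl (pvStepA robots width height)
            ((0 : Int), (-1 : Int), (none : Option Int), ([] : List (Int × Int)))).2.2.2) := rfl
  have eB : find_most_tree_like_time_alt robots width height
      = (((PySem.List.pyRange 0 (pvLcm width height) 1).foldl (pvStepB robots width height)
            ((none : Option (Int × Int)), (0 : Int), ([] : List (Int × Int)))).2.1,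
         ((PySem.List.pyRange 0 (pvLcm width height) 1).foldl (pvStepB robots width height)
            ((none : Option (Int × Int)), (0 : Int), ([] : List (Int × Int)))).2.2) := rfl
  rw [eA, eB, h1, h2]

-- ===== VERDICT (by name: the statement is the Claim_ definition above) =====
theorem find_most_tree_like_time_spec : Claim_equal_find_most_tree_like_time := by
  intro robots width height _ _
  unfold Spec_find_most_tree_like_time
  exact pvOuter_eq robots width height
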